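-- pv_equiv track=rewrite | github.com/alym00sa-dev/ai-in-education-research-agent | research_assistant/map_wwc_to_ios.py | manual_overrides
-- ===== SOURCE A (Python) =====
-- from typing import Optional, List
--
-- IOS = {
--     'tutoring': 'Adaptive Instruction & Tutoring Systems',
--     'personalized': 'Personalized Learning & Advising Systems',
--     'decision': 'Data-Driven Decision Support',
--     'mobility': 'Learning Pathways & Mobility Support'
-- }
--
-- def manual_overrides(intervention: dict) -> Optional[str]:
--     """
--     Manual overrides for specific interventions that need special handling.
--     Returns IO name or None to use automatic mapping.
--     """
--     name = intervention['intervention_name'].lower()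
--
--     # Explicitly tech interventions
--     if any(term in name for term in ['intelligent tutoring', 'itss', 'technology enhanced', 'teemss',
--                                       'computer', 'software', 'digital', 'online', 'web-based',
--                                       'read 180', 'accelerated reader', 'accelerated math']):
--         return IOS['tutoring']
--
--     # Social-emotional interventions often have tech components
--     if any(term in name for term in ['social belonging', 'mindset', 'belonging', 'self-affirmation']):
--         return IOS['personalized']
--
--     # Teacher certification/effectiveness - data-driven decision making
--     if any(term in name for term in ['teach for america', 'tfa', 'teaching fellows', 'teacher residency']):
--         return IOS['decision']
--
--     # Well-known comprehensive programs that are tech-enabled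
--     if any(term in name for term in ['linked learning', 'first year experience', 'fye']):
--         return IOS['mobility']
--
--     # Math/reading programs that could be tech-enabled
--     if any(term in name for term in ['scott foresman', 'addison wesley', 'passport reading',
--                                       'xtreme reading', 'read naturally', 'building blocks']):
--         return IOS['tutoring']
--
--     # Summer bridge and transition programs
--     if 'summer bridge' in name:
--         return IOS['mobility']
--
--     return None
-- ===== SOURCE B (Python) =====
-- from typing import Optional
--
-- CATS = [
--     'Adaptive Instruction & Tutoring Systems',
--     'Personalized Learning & Advising Systems',
--     'Data-Driven Decision Support',
--     'Learning Pathways & Mobility Support',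
--     'Adaptive Instruction & Tutoring Systems',
--     'Learning Pathways & Mobility Support',
-- ]
--
-- GROUPS = [
--     ['intelligent tutoring', 'itss', 'technology enhanced', 'teemss',
--      'computer', 'software', 'digital', 'online', 'web-based',
--      'read 180', 'accelerated reader', 'accelerated math'],
--     ['social belonging', 'mindset', 'belonging', 'self-affirmation'],
--     ['teach for america', 'tfa', 'teaching fellows', 'teacher residency'],
--     ['linked learning', 'first year experience', 'fye'],
--     ['scott foresman', 'addison wesley', 'passport reading',
--      'xtreme reading', 'read naturally', 'building blocks'],
--     ['summer bridge'],
-- ]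
--
-- FLAT = [(p, t) for p, terms in enumerate(GROUPS) for t in terms]
--
-- def manual_overrides(intervention: dict) -> Optional[str]:
--     # Exhaustively collect the priorities of ALL matching patterns, then take
--     # the arithmetic minimum and index the category table; no ordered cascade,
--     # no short-circuit.
--     name = intervention['intervention_name'].lower()
--     hits = [p for p, t in FLAT if t in name]
--     return CATS[min(hits)] if hits else None
-- ===== Notes on version B (the rewrite author's own statement) =====
-- stated objective: alternative
-- what changed: Instead of an ordered short-circuiting if-cascade, B flattens every keyword into a (priority, pattern) list, exhaustively collects the priorities of ALL patterns occurring in the name, and returns the category table entry at the arithmetic minimum priority (None if no pattern matched).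
import Mathlib
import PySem

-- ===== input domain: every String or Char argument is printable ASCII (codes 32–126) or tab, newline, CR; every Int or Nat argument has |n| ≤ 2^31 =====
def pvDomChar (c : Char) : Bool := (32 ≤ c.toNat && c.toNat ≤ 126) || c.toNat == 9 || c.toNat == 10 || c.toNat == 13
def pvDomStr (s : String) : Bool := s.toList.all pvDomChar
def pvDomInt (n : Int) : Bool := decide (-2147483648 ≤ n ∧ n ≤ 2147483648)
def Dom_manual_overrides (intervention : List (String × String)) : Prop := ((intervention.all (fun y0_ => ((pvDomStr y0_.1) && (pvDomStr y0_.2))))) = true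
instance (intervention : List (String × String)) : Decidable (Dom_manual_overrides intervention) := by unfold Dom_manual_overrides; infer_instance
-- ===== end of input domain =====

-- B replaces A's ordered short-circuit cascade by an exhaustive scan that collects the
-- priorities of all matching (priority, pattern) pairs and indexes a category table at
-- their minimum; alternative decomposition, same cost.

-- ===== PORT A =====
def manual_overrides (intervention : List (String × String)) : Option String :=
  match (PySem.Dict.mk intervention).get? "intervention_name" with
  | none => none  -- Python raises KeyError here; excluded by Pre_
  | some raw =>
    let name := PySem.Str.lower raw
    if ["intelligent tutoring", "itss", "technology enhanced", "teemss",
        "computer", "software", "digital", "online", "web-based",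
        "read 180", "accelerated reader", "accelerated math"].any
          (fun term => PySem.Str.isIn term name) then
      some "Adaptive Instruction & Tutoring Systems"
    else if ["social belonging", "mindset", "belonging", "self-affirmation"].any
          (fun term => PySem.Str.isIn term name) then
      some "Personalized Learning & Advising Systems"
    else if ["teach for america", "tfa", "teaching fellows", "teacher residency"].any
          (fun term => PySem.Str.isIn term name) then
      some "Data-Driven Decision Support"
    else if ["linked learning", "first year experience", "fye"].any
          (fun term => PySem.Str.isIn term name) then
      some "Learning Pathways & Mobility Support"
    else if ["scott foresman", "addison wesley", "passport reading",
             "xtreme reading", "read naturally", "building blocks"].any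
          (fun term => PySem.Str.isIn term name) then
      some "Adaptive Instruction & Tutoring Systems"
    else if PySem.Str.isIn "summer bridge" name then
      some "Learning Pathways & Mobility Support"
    else
      none

-- ===== PORT B =====
def pvCats : List String :=
  ["Adaptive Instruction & Tutoring Systems",
   "Personalized Learning & Advising Systems",
   "Data-Driven Decision Support",
   "Learning Pathways & Mobility Support",
   "Adaptive Instruction & Tutoring Systems",
   "Learning Pathways & Mobility Support"]

def pvGroups : List (List String) :=
  [["intelligent tutoring", "itss", "technology enhanced", "teemss",
    "computer", "software", "digital", "online", "web-based",
    "read 180", "accelerated reader", "accelerated math"],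
   ["social belonging", "mindset", "belonging", "self-affirmation"],
   ["teach for america", "tfa", "teaching fellows", "teacher residency"],
   ["linked learning", "first year experience", "fye"],
   ["scott foresman", "addison wesley", "passport reading",
    "xtreme reading", "read naturally", "building blocks"],
   ["summer bridge"]]

-- FLAT = [(p, t) for p, terms in enumerate(GROUPS) for t in terms]
def pvFlat : List (Int × String) :=
  (PySem.List.enumerate pvGroups 0).flatMap (fun pg => pg.2.map (fun t => (pg.1, t)))

def manual_overrides_alt (intervention : List (String × String)) : Option String :=
  match (PySem.Dict.mk intervention).get? "intervention_name" with
  | none => none  -- Python raises KeyError here; excluded by Pre_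
  | some raw =>
    let name := PySem.Str.lower raw
    let hits := (pvFlat.filter (fun pt => PySem.Str.isIn pt.2 name)).map (fun pt => pt.1)
    match PySem.List.min? hits (fun x => x) with
    | none => none
    | some p => PySem.List.pyGet? pvCats p

-- ===== PRECONDITION & SPEC =====
-- Pre_ excludes exactly the inputs where Python's A raises KeyError: no 'intervention_name' key.
def Pre_manual_overrides (intervention : List (String × String)) : Prop :=
  (PySem.Dict.mk intervention).contains "intervention_name" = true
instance (intervention : List (String × String)) : Decidable (Pre_manual_overrides intervention) := by unfold Pre_manual_overrides; infer_instance

def pvWitness_manual_overrides : (List (String × String)) :=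
  [("intervention_name", "Read 180 Online")]

def Spec_manual_overrides (intervention : List (String × String)) (out : Option String) : Prop := out = manual_overrides_alt intervention
instance (intervention : List (String × String)) (out : Option String) : Decidable (Spec_manual_overrides intervention out) := by unfold Spec_manual_overrides; infer_instance

-- ===== CLAIM (what is proved, stated in full; the proofs are below) =====
def Claim_equal_manual_overrides : Prop := ∀ (intervention : List (String × String)), Dom_manual_overrides intervention → Pre_manual_overrides intervention → Spec_manual_overrides intervention (manual_overrides intervention)

-- ===== LEMMAS AND PROOFS =====

-- index of the first group containing a pattern occurring in name
def pvFirstMatch (gs : List (List String)) (name : String) : Option Nat :=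
  match gs with
  | [] => none
  | g :: rest =>
    if g.any (fun t => PySem.Str.isIn t name) then some 0
    else (pvFirstMatch rest name).map Nat.succ

lemma pv_min_append_const (k : Int) (l1 l2 : List Int)
    (h1 : ∀ x ∈ l1, x = k) (h2 : ∀ x ∈ l2, k ≤ x) (hne : l1 ≠ []) :
    PySem.List.min? (l1 ++ l2) (fun x => x) = some k := by
  have hnil : l1 ++ l2 ≠ [] := by
    intro h; exact hne (List.append_eq_nil_iff.mp h).1
  cases hmin : PySem.List.min? (l1 ++ l2) (fun x => x) with
  | none => exact absurd ((PySem.List.min?_eq_none_iff _ _).mp hmin) hnil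
  | some m =>
    have hmem := PySem.List.min?_mem hmin
    have hisMin := PySem.List.min?_isMin hmin
    have hk : k ∈ l1 ++ l2 := by
      cases l1 with
      | nil => exact absurd rfl hne
      | cons a t => simp [h1 a (by simp)]
    have hle : m ≤ k := hisMin k hk
    have hge : k ≤ m := by
      rcases List.mem_append.mp hmem with h | h
      · exact le_of_eq (h1 m h).symm
      · exact h2 m h
    exact congrArg some (le_antisymm hle hge)

lemma pv_flat_lb (gs : List (List String)) (s : Int) :
    ∀ pt ∈ (PySem.List.enumerate gs s).flatMap (fun pg => pg.2.map (fun t => (pg.1, t))),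
      s ≤ pt.1 := by
  induction gs generalizing s with
  | nil => simp [PySem.List.enumerate_nil]
  | cons g rest ih =>
    intro pt hpt
    rw [PySem.List.enumerate_cons, List.flatMap_cons] at hpt
    rcases List.mem_append.mp hpt with h | h
    · rcases List.mem_map.mp h with ⟨t, _, rfl⟩; exact le_refl s
    · have := ih (s + 1) pt h; omega

lemma pv_min_firstMatch (gs : List (List String)) (s : Int) (name : String) :
    PySem.List.min?
      ((((PySem.List.enumerate gs s).flatMap
          (fun pg => pg.2.map (fun t => (pg.1, t)))).filter
            (fun pt => PySem.Str.isIn pt.2 name)).map (fun pt => pt.1)) (fun x => x)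
    = (pvFirstMatch gs name).map (fun i => s + (i : Int)) := by
  induction gs generalizing s with
  | nil => simp [PySem.List.enumerate_nil, pvFirstMatch, PySem.List.min?]
  | cons g rest ih =>
    rw [PySem.List.enumerate_cons, List.flatMap_cons, List.filter_append, List.map_append]
    have hfil : (g.map (fun t => ((s : Int), t))).filter (fun pt => PySem.Str.isIn pt.2 name)
        = (g.filter (fun t => PySem.Str.isIn t name)).map (fun t => ((s : Int), t)) := by
      rw [List.filter_map]; rfl
    rw [hfil]
    by_cases hg : g.any (fun t => PySem.Str.isIn t name)
    · have hne : (g.filter (fun t => PySem.Str.isIn t name)) ≠ [] := by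
        rcases List.any_eq_true.mp hg with ⟨t, ht, hmt⟩
        exact List.ne_nil_of_mem (List.mem_filter.mpr ⟨ht, hmt⟩)
      rw [pv_min_append_const s]
      · simp only [pvFirstMatch, hg]
        simp
      · intro x hx
        rcases List.mem_map.mp hx with ⟨pt, hpt, rfl⟩
        rcases List.mem_map.mp hpt with ⟨t, _, rfl⟩; rfl
      · intro x hx
        rcases List.mem_map.mp hx with ⟨pt, hpt, rfl⟩
        have := pv_flat_lb rest (s + 1) pt (List.mem_of_mem_filter hpt)
        omega
      · simpa using hne
    · have hempty : (g.filter (fun t => PySem.Str.isIn t name)) = [] := by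
        rw [List.filter_eq_nil_iff]
        intro t ht hmt
        exact hg (List.any_eq_true.mpr ⟨t, ht, hmt⟩)
      rw [hempty]
      simp only [List.map_nil, List.nil_append]
      rw [ih (s + 1)]
      simp only [pvFirstMatch, hg]
      cases pvFirstMatch rest name with
      | none => rfl
      | some i => simp; ring

-- ===== VERDICT (by name: the statement is the Claim_ definition above) =====
theorem manual_overrides_spec : Claim_equal_manual_overrides := by
  intro intervention _ _
  unfold Spec_manual_overrides manual_overrides manual_overrides_alt
  cases (PySem.Dict.mk intervention).get? "intervention_name" with
  | none => rfl
  | some raw =>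
    simp only []
    rw [show pvFlat = (PySem.List.enumerate pvGroups 0).flatMap
          (fun pg => pg.2.map (fun t => (pg.1, t))) from rfl,
        pv_min_firstMatch]
    set name := PySem.Str.lower raw with hname
    simp only [pvGroups, pvFirstMatch, List.any_cons, List.any_nil, Bool.or_false]
    split_ifs <;>
      simp [pvCats, PySem.List.pyGet?, PySem.List.pyIdx?]
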